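-- pv_equiv track=rewrite | github.com/Suyoung-Min/Algorithm-PS | basic_algorithm_template/여러 진법 변환.py | decimal
-- ===== SOURCE A (Python) =====
-- def decimal(target):
--     ans=0
--     for i in range(len(target)):
--         if target[i].isdigit():
--             ans+=int(target[i])*36**(len(target)-i-1)
--         else:
--             ans+=(ord(target[i]) - ord('A') + 10 )*36**(len(target)-i-1)
--     return ans
-- ===== SOURCE B (Python) =====
-- def decimal(target):
--     ans = 0
--     for c in target:
--         ans = ans * 36 + (int(c) if c.isdigit() else ord(c) - ord('A') + 10)
--     return ans
-- ===== Notes on version B (the rewrite author's own statement) =====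
-- stated objective: faster
-- what changed: Replaces the positional-weight sum with 36**(len-i-1) recomputed from scratch at every character by a single-pass Horner accumulation ans = ans*36 + digit.
import Mathlib
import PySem

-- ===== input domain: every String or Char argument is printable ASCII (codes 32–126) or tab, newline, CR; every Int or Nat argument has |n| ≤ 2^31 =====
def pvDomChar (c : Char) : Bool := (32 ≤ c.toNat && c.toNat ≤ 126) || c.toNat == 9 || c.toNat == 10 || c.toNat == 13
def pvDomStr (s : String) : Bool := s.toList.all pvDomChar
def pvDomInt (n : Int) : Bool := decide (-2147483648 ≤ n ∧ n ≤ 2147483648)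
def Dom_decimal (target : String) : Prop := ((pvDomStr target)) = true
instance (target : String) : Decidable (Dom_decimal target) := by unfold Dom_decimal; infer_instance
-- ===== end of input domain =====

-- B replaces A's per-character recomputation of 36**(len-i-1) by a one-pass Horner accumulation (faster).

-- ===== PORT A =====
-- A: ans += digit(target[i]) * 36**(len(target)-i-1) over i in range(len(target))
def decimal (target : String) : Int :=
  (PySem.List.pyRange 0 (PySem.Str.len target) 1).foldl
    (fun ans i =>
      let c := PySem.List.pyGetD target.toList i ' '   -- target[i]; i is always in range here
      if PySem.Chars.isdigit c then
        ans + (PySem.Int.ofChars? [c]).getD 0 * 36 ^ (PySem.Str.len target - i - 1).toNat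
      else
        ans + ((c.toNat : Int) - ('A'.toNat : Int) + 10) * 36 ^ (PySem.Str.len target - i - 1).toNat)
    0

-- ===== PORT B =====
-- B: single left-to-right pass, ans = ans*36 + digit(c)
def decimal_alt (target : String) : Int :=
  target.toList.foldl
    (fun ans c =>
      ans * 36 +
        (if PySem.Chars.isdigit c then (PySem.Int.ofChars? [c]).getD 0
         else (c.toNat : Int) - ('A'.toNat : Int) + 10))
    0

-- ===== PRECONDITION & SPEC =====
def Spec_decimal (target : String) (out : Int) : Prop := out = decimal_alt target
instance (target : String) (out : Int) : Decidable (Spec_decimal target out) := by unfold Spec_decimal; infer_instance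

-- ===== CLAIM (what is proved, stated in full; the proofs are below) =====
def Claim_equal_decimal : Prop := ∀ (target : String), Dom_decimal target → Spec_decimal target (decimal target)

-- ===== LEMMAS AND PROOFS =====

-- digit value of one character, shared shape of both ports
def pvDv (c : Char) : Int :=
  if PySem.Chars.isdigit c then (PySem.Int.ofChars? [c]).getD 0
  else (c.toNat : Int) - ('A'.toNat : Int) + 10

-- Horner fold with an arbitrary accumulator
theorem pvHorner_shift (cs : List Char) (a : Int) :
    cs.foldl (fun ans c => ans * 36 + pvDv c) a
      = a * 36 ^ cs.length + cs.foldl (fun ans c => ans * 36 + pvDv c) 0 := by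
  induction cs generalizing a with
  | nil => simp
  | cons c t ih =>
    simp only [List.foldl_cons, List.length_cons]
    rw [ih (a * 36 + pvDv c), ih (0 * 36 + pvDv c)]
    ring

-- the positional sum equals the Horner fold
theorem pvSum_eq_horner (cs : List Char) :
    ((List.range cs.length).map
        (fun k => pvDv (cs.getD k ' ') * 36 ^ (cs.length - 1 - k))).sum
      = cs.foldl (fun ans c => ans * 36 + pvDv c) 0 := by
  induction cs with
  | nil => simp
  | cons c t ih =>
    rw [List.length_cons, List.range_succ_eq_map]
    simp only [List.map_cons, List.map_map, List.sum_cons, List.foldl_cons]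
    rw [pvHorner_shift t (0 * 36 + pvDv c)]
    have : (List.map ((fun k => pvDv ((c :: t).getD k ' ') * 36 ^ (t.length + 1 - 1 - k)) ∘
        fun i => i + 1) (List.range t.length)).sum
        = ((List.range t.length).map
            (fun k => pvDv (t.getD k ' ') * 36 ^ (t.length - 1 - k))).sum := by
      congr 1
      apply List.map_congr_left
      intro k hk
      simp only [Function.comp, List.getD_cons_succ]
      congr 2
      omega
    rw [this, ih]
    simp only [List.getD_cons_zero]
    have hlen : t.length + 1 - 1 - 0 = t.length := by omega
    rw [hlen]
    ring

theorem pvDecimal_eq_sum (target : String) :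
    decimal target
      = ((List.range target.toList.length).map
          (fun k => pvDv (target.toList.getD k ' ')
              * 36 ^ (target.toList.length - 1 - k))).sum := by
  unfold decimal
  rw [PySem.List.pyRange_one, PySem.Str.len_eq, List.foldl_map,
      show ((target.toList.length : Int) - 0).toNat = target.toList.length by omega]
  refine Eq.trans (PySem.List.foldl_congr_mem _ _ _
      (g := fun (a : Int) (k : Nat) =>
        a + pvDv (target.toList.getD k ' ') * 36 ^ (target.toList.length - 1 - k)) ?_) ?_
  · intro a k hk
    rw [List.mem_range] at hk
    simp only [zero_add, PySem.List.pyGetD_natCast, pvDv]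
    rw [show ((target.toList.length : Int) - (k : Int) - 1).toNat
        = target.toList.length - 1 - k by omega]
    split <;> rfl
  · rw [PySem.List.foldl_add]
    simp

-- ===== VERDICT (by name: the statement is the Claim_ definition above) =====
theorem decimal_spec : Claim_equal_decimal := by
  intro target _
  show decimal target = decimal_alt target
  rw [pvDecimal_eq_sum, pvSum_eq_horner]
  unfold decimal_alt
  rfl
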